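-- pv_equiv track=rewrite | github.com/rklawrence/mimicry_bot | text_segmentation.py | segment_by_word
-- ===== SOURCE A (Python) =====
-- def segment_by_word(sentence: str) -> list[tuple[str, str]]:
--     """This segments a setence into a list of tuples where each tuple is a pair
--     of words. The first word in the tuple is the preceding word while the
--     second word is the current word.
--     NOTE: <start> will be used when there is not preceding word.
--     NOTE: <end> will be used as the current word that the last word precedes.
--
--     Args:
--         sentence (str):
--             The sentence to be segmented.
--
--     Returns:
--         list[tuple[str, str]]:
--             A pair of words where the first word is the word that came before
--             the second word.
--     """
--     previous_word = "<start>"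
--     pairs = list()
--     for word in sentence.split(" "):
--         pairs.append((previous_word, word))
--         previous_word = word
--     pairs.append((word, "<end>"))
--     return pairs
-- ===== SOURCE B (Python) =====
-- def segment_by_word(sentence: str) -> list[tuple[str, str]]:
--     words = sentence.split(" ")
--     n = len(words)
--
--     def at(i: int) -> str:
--         if i < 0:
--             return "<start>"
--         if i >= n:
--             return "<end>"
--         return words[i]
--
--     return [(at(i), at(i + 1)) for i in range(-1, n)]
-- ===== Notes on version B (the rewrite author's own statement) =====
-- stated objective: alternative
-- what changed: Replaces the stateful running-previous_word loop with a random-access formulation: a sentinel accessor at(i) over the split word list and a comprehension over range(-1, n) emitting (at(i), at(i+1)).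
import Mathlib
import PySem

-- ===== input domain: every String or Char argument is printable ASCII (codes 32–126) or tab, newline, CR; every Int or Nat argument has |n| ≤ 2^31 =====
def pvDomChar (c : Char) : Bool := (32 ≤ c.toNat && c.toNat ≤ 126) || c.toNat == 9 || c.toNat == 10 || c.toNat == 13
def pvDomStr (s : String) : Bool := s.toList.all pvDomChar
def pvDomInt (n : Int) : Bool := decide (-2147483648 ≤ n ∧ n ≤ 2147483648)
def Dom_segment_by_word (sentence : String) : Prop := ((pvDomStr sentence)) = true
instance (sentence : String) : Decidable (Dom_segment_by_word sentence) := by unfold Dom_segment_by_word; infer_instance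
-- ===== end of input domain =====

-- B replaces the running previous_word accumulator with a sentinel random-access accessor at(i) over the word list and an indexed comprehension over range(-1, n) (alternative decomposition, same cost).


-- ===== PORT A =====
def segment_by_word (sentence : String) : List (String × String) :=
  let ws := (PySem.Str.split? sentence " ").getD []
  let st := ws.foldl
    (fun (s : String × List (String × String)) word =>
      (word, s.2 ++ [(s.1, word)]))
    ("<start>", [])
  st.2 ++ [(st.1, "<end>")]

-- ===== PORT B =====
-- at(i): '<start>' for i < 0, '<end>' for i >= n, else words[i] (the branches guarantee the index is in range, so getD is exact)
def segAt (ws : List String) (i : Int) : String :=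
  if i < 0 then "<start>"
  else if (ws.length : Int) ≤ i then "<end>"
  else ws.getD i.toNat ""

def segment_by_word_alt (sentence : String) : List (String × String) :=
  let ws := (PySem.Str.split? sentence " ").getD []
  (PySem.List.pyRange (-1) (ws.length : Int) 1).map (fun i => (segAt ws i, segAt ws (i + 1)))

-- ===== PRECONDITION & SPEC =====
def Spec_segment_by_word (sentence : String) (out : List (String × String)) : Prop := out = segment_by_word_alt sentence
instance (sentence : String) (out : List (String × String)) : Decidable (Spec_segment_by_word sentence out) := by unfold Spec_segment_by_word; infer_instance

-- ===== CLAIM (what is proved, stated in full; the proofs are below) =====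
def Claim_equal_segment_by_word : Prop := ∀ (sentence : String), Dom_segment_by_word sentence → Spec_segment_by_word sentence (segment_by_word sentence)

-- ===== LEMMAS AND PROOFS =====
-- loop invariant for A: the fold with appended end-marker equals zipping the <start>/<end>-padded list
theorem seg_fold (ws : List String) (prev : String) (acc : List (String × String)) :
    (ws.foldl
      (fun (s : String × List (String × String)) word =>
        (word, s.2 ++ [(s.1, word)])) (prev, acc)).2 ++
    [((ws.foldl
      (fun (s : String × List (String × String)) word =>
        (word, s.2 ++ [(s.1, word)])) (prev, acc)).1, "<end>")] =
    acc ++ (prev :: (ws ++ ["<end>"])).zip (ws ++ ["<end>"]) := by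
  induction ws generalizing prev acc with
  | nil => simp
  | cons w rest ih =>
    simp only [List.foldl_cons]
    rw [ih]
    simp

-- the sentinel accessor reads the padded list
theorem segAt_getElem (ws : List String) (k : Nat) (hk : k < ws.length + 2) :
    segAt ws ((k : Int) - 1) =
      ("<start>" :: (ws ++ ["<end>"]))[k]'(by simp; omega) := by
  unfold segAt
  rcases k with _ | k
  · simp
  · rw [if_neg (by omega)]
    by_cases h : ws.length ≤ k
    · rw [if_pos (by push_cast; omega)]
      have hk' : k = ws.length := by omega
      subst hk'
      simp [List.getElem_append_right]
    · rw [if_neg (by push_cast; omega)]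
      have : ((((k + 1 : Nat)) : Int) - 1).toNat = k := by push_cast; omega
      rw [this]
      simp [List.getElem_cons_succ, List.getElem_append_left (by omega : k < ws.length),
        List.getD_eq_getElem?_getD, List.getElem?_eq_getElem (by omega : k < ws.length)]

-- B equals zipping the padded list
theorem seg_map (ws : List String) :
    (PySem.List.pyRange (-1) (ws.length : Int) 1).map (fun i => (segAt ws i, segAt ws (i + 1))) =
    ("<start>" :: (ws ++ ["<end>"])).zip (ws ++ ["<end>"]) := by
  rw [PySem.List.pyRange_one, List.map_map]
  apply List.ext_getElem
  · simp [List.length_zip]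
  · intro k h1 h2
    simp only [List.getElem_map, List.getElem_range, Function.comp_apply, List.getElem_zip]
    have hlen : k < ws.length + 1 := by simpa using h1
    have e1 : (-1 : Int) + (k : Int) = (k : Int) - 1 := by ring
    have e2 : (k : Int) - 1 + 1 = ((k + 1 : Nat) : Int) - 1 := by push_cast; ring
    rw [e1, e2, segAt_getElem ws k (by omega), segAt_getElem ws (k + 1) (by omega)]
    simp

-- ===== VERDICT (by name: the statement is the Claim_ definition above) =====
theorem segment_by_word_spec : Claim_equal_segment_by_word := by
  intro sentence _
  unfold Spec_segment_by_word segment_by_word segment_by_word_alt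
  rw [seg_map]
  exact seg_fold _ _ _
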